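-- pv_equiv track=rewrite | github.com/tushushu/Learning-Python | Deep learning/similar_images.py | d_hash2
-- ===== SOURCE A (Python) =====
-- def d_hash2(diff):
--     hash_string = ""
--     for row in diff:
--         decimal_value = 0
--         for index, value in enumerate(row):
--             # 为了节约时间，value为False不用计算
--             if value:
--                 decimal_value += value * (2 ** index)
--         # 不足2位以0填充，0xf=>0x0f
--         hash_string += str(hex(decimal_value)[2:].rjust(2, "0"))
--     return hash_string
-- ===== SOURCE B (Python) =====
-- def _row_value(row):
--     # divide and conquer: value of row = value(left) + 2**mid * value(right)
--     if not row:
--         return 0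
--     if len(row) == 1:
--         return row[0]
--     mid = len(row) // 2
--     return _row_value(row[:mid]) + (1 << mid) * _row_value(row[mid:])
--
--
-- def d_hash2(diff):
--     parts = []
--     for row in diff:
--         parts.append(hex(_row_value(row))[2:].rjust(2, "0"))
--     return "".join(parts)
-- ===== Notes on version B (the rewrite author's own statement) =====
-- stated objective: alternative
-- what changed: B computes each row's decimal value by divide-and-conquer on the row (value = value(left half) + 2**mid * value(right half)) instead of A's linear enumerate loop accumulating value*(2**index), and joins per-row hex parts once instead of repeated string concatenation.
import Mathlib
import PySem

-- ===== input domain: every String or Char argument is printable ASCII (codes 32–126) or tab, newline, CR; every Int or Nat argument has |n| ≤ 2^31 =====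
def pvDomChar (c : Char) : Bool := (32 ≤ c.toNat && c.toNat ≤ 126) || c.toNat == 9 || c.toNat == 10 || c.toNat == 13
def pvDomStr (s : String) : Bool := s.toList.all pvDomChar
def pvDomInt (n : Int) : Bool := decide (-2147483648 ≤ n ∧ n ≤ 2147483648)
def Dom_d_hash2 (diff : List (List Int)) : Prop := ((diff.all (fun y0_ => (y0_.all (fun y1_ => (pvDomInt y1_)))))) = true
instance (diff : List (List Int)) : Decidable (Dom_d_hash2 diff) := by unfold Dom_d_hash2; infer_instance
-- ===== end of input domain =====

-- B replaces A's linear enumerate/2**index accumulation with a divide-and-conquer row value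
-- (value = left + 2^mid * right) and a single join of per-row hex parts (alternative, not faster).

-- ===== PORT A =====
-- shared formatting helper: Python's hex(n)[2:].rjust(2, "0") (hex digit list of n, exact
-- including the negative case where hex(-3)[2:] = "x3"); both Pythons use this exact expression
def pvHexDigits (n : Nat) : List Char :=
  if _h : n = 0 then [] else pvHexDigits (n / 16) ++ [Nat.digitChar (n % 16)]
decreasing_by exact Nat.div_lt_self (Nat.pos_of_ne_zero _h) (by norm_num)

def pvHexFmt (n : Int) : List Char :=
  let h : List Char :=
    if n < 0 then '-' :: '0' :: 'x' :: pvHexDigits (-n).toNat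
    else if n = 0 then ['0', 'x', '0']
    else '0' :: 'x' :: pvHexDigits n.toNat
  let t := h.drop 2
  if t.length < 2 then List.replicate (2 - t.length) '0' ++ t else t

def d_hash2 (diff : List (List Int)) : String :=
  String.mk (diff.foldl (fun hash_string row =>
    let decimal_value : Int :=
      (PySem.List.enumerate row 0).foldl
        (fun acc p => if p.2 ≠ 0 then acc + p.2 * (2 ^ p.1.toNat) else acc) 0
    hash_string ++ pvHexFmt decimal_value) [])

-- ===== PORT B =====
-- divide and conquer on the row (guards make the recursion total; row[0] on a nonempty row = headI)
def pvRowValue (row : List Int) : Int :=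
  if row = [] then 0
  else if row.length = 1 then row.headI
  else
    let mid := row.length / 2
    pvRowValue (row.take mid) + 2 ^ mid * pvRowValue (row.drop mid)
termination_by row.length
decreasing_by
  · simp only [List.length_take]
    rename_i h1 h2
    have : row.length ≠ 0 := by simpa [List.length_eq_zero_iff] using h1
    omega
  · simp only [List.length_drop]
    rename_i h1 h2
    have : row.length ≠ 0 := by simpa [List.length_eq_zero_iff] using h1
    omega

def d_hash2_alt (diff : List (List Int)) : String :=
  String.mk ((diff.map (fun row => pvHexFmt (pvRowValue row))).flatten)

-- ===== PRECONDITION & SPEC =====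
def Spec_d_hash2 (diff : List (List Int)) (out : String) : Prop := out = d_hash2_alt diff
instance (diff : List (List Int)) (out : String) : Decidable (Spec_d_hash2 diff out) := by unfold Spec_d_hash2; infer_instance

-- ===== CLAIM =====
def Claim_equal_d_hash2 : Prop := ∀ (diff : List (List Int)), Dom_d_hash2 diff → Spec_d_hash2 diff (d_hash2 diff)

-- ===== LEMMAS AND PROOFS =====

-- the common specification value of a row: little-endian positional value
def pvPos (row : List Int) : Int := row.foldr (fun v d => d * 2 + v) 0

-- A's branch 'if value: acc += value*2**index' adds 0 when value = 0, so it is plus unconditionally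
lemma pvA_step_eq :
    (fun (acc : Int) (p : Int × Int) => if p.2 ≠ 0 then acc + p.2 * (2 ^ p.1.toNat) else acc)
      = (fun acc p => acc + p.2 * (2 ^ p.1.toNat)) := by
  funext acc p
  by_cases h : p.2 = 0 <;> simp [h]

-- A's positional sum starting at index s equals 2^s times the positional value
lemma pvInner (row : List Int) (s : Nat) (acc : Int) :
    (PySem.List.enumerate row (s : Int)).foldl
        (fun acc p => acc + p.2 * (2 ^ p.1.toNat)) acc
      = acc + 2 ^ s * pvPos row := by
  induction row generalizing s acc with
  | nil => simp [PySem.List.enumerate_nil, pvPos]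
  | cons x xs ih =>
    have h1 : ((s : Int) + 1) = ((s + 1 : Nat) : Int) := by push_cast; ring
    simp only [PySem.List.enumerate_cons, List.foldl_cons, pvPos, List.foldr_cons, h1]
    rw [ih (s+1)]
    simp only [Int.toNat_natCast, pvPos]
    ring

-- splitting lemma for the positional value
lemma pvPos_append (l r : List Int) : pvPos (l ++ r) = pvPos l + 2 ^ l.length * pvPos r := by
  induction l with
  | nil => simp [pvPos]
  | cons x xs ih =>
    simp only [List.cons_append, pvPos, List.foldr_cons, List.length_cons] at *
    rw [ih]
    ring

-- B's divide-and-conquer value equals the positional value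
lemma pvRowValue_eq (row : List Int) : pvRowValue row = pvPos row := by
  induction row using pvRowValue.induct with
  | case1 => simp [pvRowValue, pvPos]
  | case2 row h1 h2 =>
    match row, h2 with
    | [x], _ => simp [pvRowValue, pvPos]
  | case3 row h1 h2 mid ih1 ih2 =>
    rw [pvRowValue]
    simp only [h1, if_false, h2, if_false]
    rw [ih1, ih2]
    have hm : (row.take mid).length = mid := by
      simp only [List.length_take]
      have : row.length ≠ 0 := by simpa [List.length_eq_zero_iff] using h1
      omega
    calc pvPos (row.take mid) + 2 ^ mid * pvPos (row.drop mid)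
        = pvPos (row.take mid) + 2 ^ (row.take mid).length * pvPos (row.drop mid) := by rw [hm]
      _ = pvPos (row.take mid ++ row.drop mid) := (pvPos_append _ _).symm
      _ = pvPos row := by rw [List.take_append_drop]

-- outer loop: A's foldl string accumulation with an initial prefix = prefix ++ B's flattened parts
lemma pvOuter (diff : List (List Int)) (init : List Char) :
    diff.foldl (fun hs row =>
        hs ++ pvHexFmt (((PySem.List.enumerate row 0).foldl
          (fun acc p => if p.2 ≠ 0 then acc + p.2 * (2 ^ p.1.toNat) else acc) 0))) init
      = init ++ (diff.map (fun row => pvHexFmt (pvRowValue row))).flatten := by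
  induction diff generalizing init with
  | nil => simp
  | cons r rs ih =>
    simp only [List.foldl_cons, List.map_cons, List.flatten_cons, ih, List.append_assoc]
    congr 2
    rw [pvA_step_eq, pvRowValue_eq]
    have h0 : (PySem.List.enumerate r 0) = (PySem.List.enumerate r ((0:Nat):Int)) := by norm_num
    rw [h0, pvInner r 0 0]
    norm_num

-- ===== VERDICT =====
theorem d_hash2_spec : Claim_equal_d_hash2 := by
  intro diff _
  unfold Spec_d_hash2 d_hash2 d_hash2_alt
  simp only [pvOuter diff [], List.nil_append]
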